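-- pv_equiv track=rewrite | github.com/kiwi-sherbet/CS440 | mp1/scripts/run.py | populate_array_from_lines
-- ===== SOURCE A (Python) =====
-- def populate_array_from_lines(maze_rows, maze_ra, isDot):
--     """Populates an array given string rows of equal length.
--
--     Assumes that each string row in the list of rows contains the same
--     number of characters. One character is assigned to each location
--     in the array. The given array is assumed to have the correct row
--     and column lengths.
--
--     Args:
--         maze_rows: The list of lines representing the rows of the
--             maze.
--         maze_ra: The array to write the characters of the maze to.
--         isDot: if the goal of this maze is to eat up dots instead of finding exit
--     Returns:
--         maze_ra: The populated array.
--         start: The (r,c) coordinates of 'P', the start point.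
--         end: The (r,c) coordinates of '.', the end point.
--         dots: a non-empty array if the goal is to eat dots, else an empty array
--     """
--     r_idx = c_idx = 0
--     start = end = ()
--     ghost_start = []
--     dots = []
--     walls = []
--     for row in maze_rows:
--         row = row.strip()
--         for c in row:
--             if c == '%':
--                 walls.append((r_idx, c_idx))
--             elif c == 'P':
--                 start = (r_idx, c_idx)
--             elif c == '.':
--                 dots.append((r_idx, c_idx))
--             elif c == 'G':
--                 ghost_start.append((r_idx, c_idx))
--             maze_ra[r_idx][c_idx] = c
--             c_idx += 1
--         # Reset all the way to the left, move down one row.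
--         c_idx = 0
--         r_idx += 1
--     return maze_ra, start, dots, ghost_start, walls
-- ===== SOURCE B (Python) =====
-- def populate_array_from_lines(maze_rows, maze_ra, isDot):
--     """Two-phase rewrite: populate maze_ra first, then classify cells by
--     grouping every (char, position) pair in one dict; mutates maze_ra like A."""
--     stripped = [row.strip() for row in maze_rows]
--     # phase 1: write every character into the array
--     for r, row in enumerate(stripped):
--         for c, ch in enumerate(row):
--             maze_ra[r][c] = ch
--     # phase 2: group positions by character, row-major order
--     pairs = [(ch, (r, c)) for r, row in enumerate(stripped) for c, ch in enumerate(row)]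
--     groups = {}
--     for ch, pos in pairs:
--         groups.setdefault(ch, []).append(pos)
--     ps = groups.get('P', [])
--     start = ps[-1] if ps else ()
--     return maze_ra, start, groups.get('.', []), groups.get('G', []), groups.get('%', [])
-- ===== Notes on version B (the rewrite author's own statement) =====
-- stated objective: simpler
-- what changed: A's single fused loop with five running accumulators is split into a populate phase (write chars into maze_ra) and a classify phase that groups all (char, position) pairs into one dict and reads walls/dots/ghosts/start off groups.get, start being the last 'P' position.
import Mathlib
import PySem

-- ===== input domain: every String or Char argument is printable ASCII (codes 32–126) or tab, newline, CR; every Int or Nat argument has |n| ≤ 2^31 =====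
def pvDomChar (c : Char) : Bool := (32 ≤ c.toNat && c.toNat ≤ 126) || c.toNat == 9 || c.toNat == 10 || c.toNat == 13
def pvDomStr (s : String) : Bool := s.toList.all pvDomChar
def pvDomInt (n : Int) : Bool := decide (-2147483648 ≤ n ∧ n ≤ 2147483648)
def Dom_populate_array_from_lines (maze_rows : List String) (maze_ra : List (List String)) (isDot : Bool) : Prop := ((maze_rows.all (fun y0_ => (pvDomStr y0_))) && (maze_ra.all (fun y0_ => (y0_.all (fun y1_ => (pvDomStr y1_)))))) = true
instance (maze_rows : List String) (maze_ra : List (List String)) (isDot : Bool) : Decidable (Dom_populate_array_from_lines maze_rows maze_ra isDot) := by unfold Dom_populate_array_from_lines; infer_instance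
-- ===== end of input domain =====

-- B splits A's fused loop into a populate phase and a dict-grouping classify phase; both
-- mutate maze_ra in Python in the same way (the claim here is about the returned tuple).

-- maze_ra[r][c] = ch  (in-range on every input admitted by Pre_; out of range Python raises)
def pvWr (ra : List (List String)) (r c : Int) (ch : Char) : List (List String) :=
  PySem.List.pySetD ra r (PySem.List.pySetD (PySem.List.pyGetD ra r []) c (String.mk [ch]))

-- ===== PORT A =====
structure PvSt where
  ra : List (List String)
  start : Option (Int × Int)
  dots : List (Int × Int)
  ghosts : List (Int × Int)
  walls : List (Int × Int)
deriving Repr, DecidableEq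

def pvArow (r : Int) : Int → List Char → PvSt → PvSt
  | _, [], st => st
  | c, ch :: rest, st =>
    let st1 : PvSt :=
      if ch = '%' then { st with walls := st.walls ++ [(r, c)] }
      else if ch = 'P' then { st with start := some (r, c) }
      else if ch = '.' then { st with dots := st.dots ++ [(r, c)] }
      else if ch = 'G' then { st with ghosts := st.ghosts ++ [(r, c)] }
      else st
    pvArow r (c + 1) rest { st1 with ra := pvWr st1.ra r c ch }

def pvArows : Int → List String → PvSt → PvSt
  | _, [], st => st
  | r, row :: rest, st => pvArows (r + 1) rest (pvArow r 0 (PySem.Str.strip row).toList st)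

def populate_array_from_lines (maze_rows : List String) (maze_ra : List (List String)) (isDot : Bool) : List (List String) × (Int × Int) × (List (Int × Int)) × (List (Int × Int)) × (List (Int × Int)) :=
  let st := pvArows 0 maze_rows ⟨maze_ra, none, [], [], []⟩
  -- Python returns start = () when no 'P' occurs: not a value of Int × Int, so outside Pre_; (0, 0) is a placeholder
  (st.ra, st.start.getD (0, 0), st.dots, st.ghosts, st.walls)

-- ===== PORT B =====
def populate_array_from_lines_alt (maze_rows : List String) (maze_ra : List (List String)) (isDot : Bool) : List (List String) × (Int × Int) × (List (Int × Int)) × (List (Int × Int)) × (List (Int × Int)) :=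
  let stripped := maze_rows.map (fun q => (PySem.Str.strip q).toList)
  -- phase 1: populate
  let ra2 := (PySem.List.enumerate stripped 0).foldl
    (fun a p => (PySem.List.enumerate p.2 0).foldl (fun a q => pvWr a p.1 q.1 q.2) a) maze_ra
  -- phase 2: classify — group positions by character
  let pairs := (PySem.List.enumerate stripped 0).flatMap
    (fun p => (PySem.List.enumerate p.2 0).map (fun q => (q.2, (p.1, q.1))))
  let groups := pairs.foldl (fun d pr => d.modify pr.1 [] (fun l => l ++ [pr.2]))
    (PySem.Dict.empty : PySem.Dict Char (List (Int × Int)))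
  let ps := groups.getD 'P' []
  -- ps[-1] if ps else (): the ()-case is outside Pre_; (0, 0) is a placeholder
  (ra2, ps.getLast?.getD (0, 0), groups.getD '.' [], groups.getD 'G' [], groups.getD '%' [])

-- ===== PRECONDITION & SPEC =====
-- Pre_ excludes exactly (a) inputs with no 'P' in any stripped row, where Python A returns start = (),
-- which is not a value of Int × Int, and (b) inputs whose stripped rows overrun maze_ra, where A raises IndexError.
def Pre_populate_array_from_lines (maze_rows : List String) (maze_ra : List (List String)) (isDot : Bool) : Prop :=
  (∃ row ∈ maze_rows, 'P' ∈ (PySem.Str.strip row).toList) ∧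
  (∀ i, i < maze_rows.length →
    (PySem.Str.strip (maze_rows.getD i "")).toList ≠ [] →
      i < maze_ra.length ∧ (PySem.Str.strip (maze_rows.getD i "")).toList.length ≤ (maze_ra.getD i []).length)
instance (maze_rows : List String) (maze_ra : List (List String)) (isDot : Bool) : Decidable (Pre_populate_array_from_lines maze_rows maze_ra isDot) := by unfold Pre_populate_array_from_lines; infer_instance

def pvWitness_populate_array_from_lines : List String × List (List String) × Bool :=
  (["%P."], [["a", "b", "c"]], false)

def Spec_populate_array_from_lines (maze_rows : List String) (maze_ra : List (List String)) (isDot : Bool) (out : List (List String) × (Int × Int) × (List (Int × Int)) × (List (Int × Int)) × (List (Int × Int))) : Prop := out = populate_array_from_lines_alt maze_rows maze_ra isDot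
instance (maze_rows : List String) (maze_ra : List (List String)) (isDot : Bool) (out : List (List String) × (Int × Int) × (List (Int × Int)) × (List (Int × Int)) × (List (Int × Int))) : Decidable (Spec_populate_array_from_lines maze_rows maze_ra isDot out) := by unfold Spec_populate_array_from_lines; infer_instance

-- ===== CLAIM (what is proved, stated in full; the proofs are below) =====
def Claim_equal_populate_array_from_lines : Prop := ∀ (maze_rows : List String) (maze_ra : List (List String)) (isDot : Bool), Dom_populate_array_from_lines maze_rows maze_ra isDot → Pre_populate_array_from_lines maze_rows maze_ra isDot → Spec_populate_array_from_lines maze_rows maze_ra isDot (populate_array_from_lines maze_rows maze_ra isDot)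

-- ===== LEMMAS AND PROOFS =====

-- positions of character ch in one stripped row / in all stripped rows (row-major)
def pvPosR (ch : Char) (r : Int) : Int → List Char → List (Int × Int)
  | _, [] => []
  | c, x :: rest => (if x = ch then [(r, c)] else []) ++ pvPosR ch r (c + 1) rest

def pvPosAll (ch : Char) : Int → List (List Char) → List (Int × Int)
  | _, [] => []
  | r, row :: rest => pvPosR ch r 0 row ++ pvPosAll ch (r + 1) rest

theorem pv_getLast?_or_cons {α : Type} (x : α) (l : List α) (s : Option α) :
    ((x :: l).getLast?).or s = (l.getLast?).or (some x) := by
  induction l generalizing x s with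
  | nil => simp
  | cons y t ih => rw [List.getLast?_cons_cons, ih, ih]

theorem pvArow_eq (r : Int) (row : List Char) : ∀ (c : Int) (st : PvSt),
    pvArow r c row st =
      ⟨(PySem.List.enumerate row c).foldl (fun a q => pvWr a r q.1 q.2) st.ra,
       ((pvPosR 'P' r c row).getLast?).or st.start,
       st.dots ++ pvPosR '.' r c row,
       st.ghosts ++ pvPosR 'G' r c row,
       st.walls ++ pvPosR '%' r c row⟩ := by
  induction row with
  | nil => intro c st; simp [pvArow, pvPosR, PySem.List.enumerate_nil]
  | cons ch rest ih =>
    intro c st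
    rw [pvArow, ih, PySem.List.enumerate_cons]
    by_cases h1 : ch = '%'
    · subst h1; simp [pvPosR]
    · by_cases h2 : ch = 'P'
      · subst h2; simp [pvPosR, pv_getLast?_or_cons]
      · by_cases h3 : ch = '.'
        · subst h3; simp [pvPosR]
        · by_cases h4 : ch = 'G'
          · subst h4; simp [pvPosR]
          · simp [pvPosR, h1, h2, h3, h4]

theorem pvArows_eq (rows : List String) : ∀ (r : Int) (st : PvSt),
    pvArows r rows st =
      ⟨(PySem.List.enumerate (rows.map (fun q => (PySem.Str.strip q).toList)) r).foldl
         (fun a p => (PySem.List.enumerate p.2 0).foldl (fun a q => pvWr a p.1 q.1 q.2) a) st.ra,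
       ((pvPosAll 'P' r (rows.map (fun q => (PySem.Str.strip q).toList))).getLast?).or st.start,
       st.dots ++ pvPosAll '.' r (rows.map (fun q => (PySem.Str.strip q).toList)),
       st.ghosts ++ pvPosAll 'G' r (rows.map (fun q => (PySem.Str.strip q).toList)),
       st.walls ++ pvPosAll '%' r (rows.map (fun q => (PySem.Str.strip q).toList))⟩ := by
  induction rows with
  | nil => intro r st; simp [pvArows, pvPosAll, PySem.List.enumerate_nil]
  | cons row rest ih =>
    intro r st
    rw [pvArows, ih, pvArow_eq]
    simp [pvPosAll, PySem.List.enumerate_cons, List.getLast?_append, Option.or_assoc]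

theorem pvPairsR_eq (ch : Char) (r : Int) (row : List Char) : ∀ (c : Int),
    ((((PySem.List.enumerate row c).map (fun q => (q.2, (r, q.1)))).filter
       (fun pr => pr.1 == ch)).map (fun pr => pr.2)) = pvPosR ch r c row := by
  induction row with
  | nil => intro c; simp [pvPosR, PySem.List.enumerate_nil]
  | cons x rest ih =>
    intro c
    rw [PySem.List.enumerate_cons]
    by_cases h : x = ch
    · subst h; simp [pvPosR, ih]
    · simp [pvPosR, h, ih]

theorem pvPairsAll_eq (ch : Char) (rows : List (List Char)) : ∀ (r : Int),
    ((((PySem.List.enumerate rows r).flatMap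
        (fun p => (PySem.List.enumerate p.2 0).map (fun q => (q.2, (p.1, q.1))))).filter
       (fun pr => pr.1 == ch)).map (fun pr => pr.2)) = pvPosAll ch r rows := by
  induction rows with
  | nil => intro r; simp [pvPosAll, PySem.List.enumerate_nil]
  | cons row rest ih =>
    intro r
    rw [PySem.List.enumerate_cons]
    simp only [List.flatMap_cons, List.filter_append, List.map_append, ih, pvPosAll]
    rw [pvPairsR_eq]

-- ===== VERDICT (by name: the statement is the Claim_ definition above) =====
theorem populate_array_from_lines_spec : Claim_equal_populate_array_from_lines := by
  intro maze_rows maze_ra isDot _ _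
  unfold Spec_populate_array_from_lines populate_array_from_lines populate_array_from_lines_alt
  rw [pvArows_eq]
  simp only [PySem.Dict.getD_foldl_modify_append, PySem.Dict.getD_empty, pvPairsAll_eq,
    List.nil_append, Option.or_none]
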